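-- pv_equiv track=rewrite | github.com/MLesartre/algobowl | algobowl.py | splitSolve
-- ===== SOURCE A (Python) =====
-- def splitSolve(numNodes):
--     left=set()
--     right=set()
--     for i in range(1, numNodes):
--         if i%2==0:
--             left.add(i)
--         else:
--             right.add(i)
--     return (left,right)
-- ===== SOURCE B (Python) =====
-- def splitSolve(numNodes):
--     # evens and odds of 1..numNodes-1 via two strided ranges, no parity test
--     left = set(range(2, numNodes, 2))
--     right = set(range(1, numNodes, 2))
--     return (left, right)
-- ===== Notes on version B (the rewrite author's own statement) =====
-- stated objective: idiomatic
-- what changed: Replaces the single loop over all nodes with a parity branch by two branch-free strided-range set constructions, one per parity class.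
import Mathlib
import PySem

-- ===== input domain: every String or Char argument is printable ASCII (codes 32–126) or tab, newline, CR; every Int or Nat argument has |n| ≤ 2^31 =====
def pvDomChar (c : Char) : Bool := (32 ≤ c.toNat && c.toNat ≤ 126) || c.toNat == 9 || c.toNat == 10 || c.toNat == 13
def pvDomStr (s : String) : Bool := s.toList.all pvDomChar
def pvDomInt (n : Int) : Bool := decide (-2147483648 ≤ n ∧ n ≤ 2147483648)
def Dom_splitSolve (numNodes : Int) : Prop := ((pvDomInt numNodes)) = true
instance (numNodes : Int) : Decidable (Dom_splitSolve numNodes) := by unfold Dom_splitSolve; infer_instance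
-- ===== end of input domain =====

-- B builds the two parity classes directly with two strided ranges instead of A's
-- single branching loop; objective: idiomatic (same O(n) cost).

-- ===== PORT A =====
def splitSolve (numNodes : Int) : List Int × List Int :=
  (PySem.List.pyRange 1 numNodes 1).foldl
    (fun lr i =>
      if PySem.Int.mod i 2 = 0 then (PySem.Set.add lr.1 i, lr.2)
      else (lr.1, PySem.Set.add lr.2 i))
    (PySem.Set.empty, PySem.Set.empty)

-- ===== PORT B =====
def splitSolve_alt (numNodes : Int) : List Int × List Int :=
  (PySem.Set.ofList (PySem.List.pyRange 2 numNodes 2),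
   PySem.Set.ofList (PySem.List.pyRange 1 numNodes 2))

-- ===== PRECONDITION & SPEC =====
def Spec_splitSolve (numNodes : Int) (out : List Int × List Int) : Prop := out = splitSolve_alt numNodes
instance (numNodes : Int) (out : List Int × List Int) : Decidable (Spec_splitSolve numNodes out) := by unfold Spec_splitSolve; infer_instance

-- ===== CLAIM (what is proved, stated in full; the proofs are below) =====
def Claim_equal_splitSolve : Prop := ∀ (numNodes : Int), Dom_splitSolve numNodes → Spec_splitSolve numNodes (splitSolve numNodes)

-- ===== LEMMAS AND PROOFS =====

-- range(a, b, 2) is empty when b ≤ a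
theorem pyRange_two_empty (a b : Int) (h : b ≤ a) : PySem.List.pyRange a b 2 = [] := by
  rw [PySem.List.pyRange_of_pos a b (by norm_num)]
  simp [show ¬ a < b by omega]

-- extending the upper bound past b appends b when b has the stride's parity
theorem pyRange_two_append (a b : Int) (hab : a ≤ b) (hpar : (b - a) % 2 = 0) :
    PySem.List.pyRange a (b + 1) 2 = PySem.List.pyRange a b 2 ++ [b] := by
  obtain ⟨t, ht⟩ : ∃ t : Int, b - a = 2 * t := ⟨(b - a) / 2, by omega⟩
  have ht0 : 0 ≤ t := by omega
  rw [PySem.List.pyRange_of_pos a (b + 1) (by norm_num),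
      PySem.List.pyRange_of_pos a b (by norm_num)]
  have h1 : ((b + 1 - a + 2 - 1) / 2).toNat = t.toNat + 1 := by omega
  have h2 : (if a < b then ((b - a + 2 - 1) / 2).toNat else 0) = t.toNat := by
    split_ifs with h
    · omega
    · omega
  rw [show (if a < b + 1 then ((b + 1 - a + 2 - 1) / 2).toNat else 0) = t.toNat + 1 by
        rw [if_pos (by omega)]; exact h1, h2]
  have hb : a + 2 * (t.toNat : Int) = b := by omega
  rw [List.range_succ, List.map_append, List.map_singleton, hb]

-- extending the upper bound past b changes nothing when b misses the stride's parity
theorem pyRange_two_skip (a b : Int) (hab : a ≤ b) (hpar : (b - a) % 2 = 1) :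
    PySem.List.pyRange a (b + 1) 2 = PySem.List.pyRange a b 2 := by
  obtain ⟨t, ht⟩ : ∃ t : Int, b - a = 2 * t + 1 := ⟨(b - a) / 2, by omega⟩
  rw [PySem.List.pyRange_of_pos a (b + 1) (by norm_num),
      PySem.List.pyRange_of_pos a b (by norm_num)]
  rw [if_pos (by omega), if_pos (by omega)]
  congr 2
  omega

theorem Set_ofList_append_singleton (xs : List Int) (x : Int) :
    PySem.Set.ofList (xs ++ [x]) = PySem.Set.add (PySem.Set.ofList xs) x := by
  rw [PySem.Set.ofList_eq_foldl, PySem.Set.ofList_eq_foldl, List.foldl_append]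
  rfl

theorem splitSolve_eq_alt (n : Int) : splitSolve n = splitSolve_alt n := by
  by_cases h : n ≤ 1
  · -- all three ranges are empty
    unfold splitSolve splitSolve_alt
    rw [pyRange_two_empty 2 n (by omega), pyRange_two_empty 1 n h]
    rw [PySem.List.pyRange_of_pos 1 n (by norm_num), if_neg (by omega)]
    rfl
  · -- n ≥ 2 : induction upwards from 2... use Int.le_induction from base 2? base 1 is simpler
    have h1 : (1 : Int) ≤ n := by omega
    clear h
    induction n, h1 using Int.le_induction with
    | base =>
        unfold splitSolve splitSolve_alt
        decide
    | succ m hm ih =>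
        have hprev := ih
        unfold splitSolve at hprev ⊢
        rw [PySem.List.pyRange_one_succ_right hm, List.foldl_append, hprev]
        unfold splitSolve_alt
        simp only [List.foldl_cons, List.foldl_nil]
        rcases Int.even_or_odd m with ⟨t, hev⟩ | ⟨t, hod⟩
        · -- m even: left grows, right unchanged
          have hm2 : (2 : Int) ≤ m := by omega
          rw [if_pos (by rw [PySem.Int.mod_eq_zero_iff_dvd]; omega)]
          rw [pyRange_two_append 2 m hm2 (by omega), pyRange_two_skip 1 m hm (by omega),
              Set_ofList_append_singleton]
        · -- m odd: right grows, left unchanged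
          rw [if_neg (by rw [PySem.Int.mod_eq_zero_iff_dvd]; omega)]
          rw [pyRange_two_append 1 m hm (by omega), Set_ofList_append_singleton]
          by_cases hm2 : 2 ≤ m
          · rw [pyRange_two_skip 2 m hm2 (by omega)]
          · rw [pyRange_two_empty 2 (m + 1) (by omega), pyRange_two_empty 2 m (by omega)]

-- ===== VERDICT (by name: the statement is the Claim_ definition above) =====
theorem splitSolve_spec : Claim_equal_splitSolve := by
  intro n _
  exact splitSolve_eq_alt n
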